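-- pv_equiv track=rewrite | github.com/fanyanpeng/A444 | 106-wordcount/src/word_count.py | count
-- ===== SOURCE A (Python) =====
-- def count(wordlist):
--     dic = {}
--     max = 0
--     for s in wordlist:
--         if len(s) > max:
--             max = len(s)
--         if s not in dic:
--             dic[s] = 1
--         else:
--             dic[s] += 1
--     return dic, max
-- ===== SOURCE B (Python) =====
-- def count(wordlist):
--     n = len(wordlist)
--     if n == 0:
--         return {}, 0
--     if n == 1:
--         s = wordlist[0]
--         return {s: 1}, len(s)
--     ld, lm = count(wordlist[:n // 2])
--     rd, rm = count(wordlist[n // 2:])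
--     for k, v in rd.items():
--         ld[k] = ld.get(k, 0) + v
--     return ld, lm if lm > rm else rm
-- ===== Notes on version B (the rewrite author's own statement) =====
-- stated objective: alternative
-- what changed: B replaces A's single accumulating loop with divide and conquer: it splits the list at the midpoint, recursively counts each half, then merges the right half's count dict into the left's and keeps the larger of the two maxima (first-occurrence key order is preserved because merging keeps existing keys in place and appends new ones in order).
import Mathlib
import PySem

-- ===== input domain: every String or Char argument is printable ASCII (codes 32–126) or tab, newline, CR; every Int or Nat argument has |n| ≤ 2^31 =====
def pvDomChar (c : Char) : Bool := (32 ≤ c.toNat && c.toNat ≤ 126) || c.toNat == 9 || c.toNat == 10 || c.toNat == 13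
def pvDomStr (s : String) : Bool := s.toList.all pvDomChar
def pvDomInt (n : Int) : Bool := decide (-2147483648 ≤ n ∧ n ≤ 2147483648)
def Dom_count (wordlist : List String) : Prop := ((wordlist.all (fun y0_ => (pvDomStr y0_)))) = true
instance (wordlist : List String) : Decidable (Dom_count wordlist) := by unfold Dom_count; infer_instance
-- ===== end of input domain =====

-- B re-implements A's single counting loop by divide and conquer (split in half, recurse, merge the
-- two count dicts and take the larger max); objective: alternative (not faster).


-- ===== PORT A =====
def count (wordlist : List String) : (List (String × Int)) × Int :=
  let r := wordlist.foldl (fun (st : PySem.Dict String Int × Int) s =>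
      (if st.1.contains s = false then st.1.insert s 1
       else st.1.modify s 0 (fun v => v + 1),
       if PySem.Str.len s > st.2 then PySem.Str.len s else st.2)) (PySem.Dict.empty, 0)
  (r.1.items, r.2)

-- ===== PORT B =====
-- recursive core of Source B: split at n//2, recurse on both halves, merge right counts into the left dict
def countRec (wl : List String) : PySem.Dict String Int × Int :=
  if wl.length = 0 then (PySem.Dict.empty, 0)
  else if wl.length = 1 then
    let s := PySem.List.pyGetD wl 0 ""
    (PySem.Dict.empty.insert s 1, PySem.Str.len s)
  else
    let half := PySem.Int.floordiv (wl.length : Int) 2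
    let lp := countRec (PySem.List.slice wl none (some half))
    let rp := countRec (PySem.List.slice wl (some half) none)
    (rp.1.items.foldl (fun d p => d.insert p.1 (d.getD p.1 0 + p.2)) lp.1,
     if lp.2 > rp.2 then lp.2 else rp.2)
termination_by wl.length
decreasing_by
  · rw [show PySem.Int.floordiv ((wl.length : Int)) 2 = ((wl.length / 2 : Nat) : Int) from by
        exact_mod_cast PySem.Int.floordiv_natCast wl.length 2,
      PySem.List.slice_to wl (by positivity)]
    simp only [Int.toNat_natCast, List.length_take]
    omega
  · rw [show PySem.Int.floordiv ((wl.length : Int)) 2 = ((wl.length / 2 : Nat) : Int) from by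
        exact_mod_cast PySem.Int.floordiv_natCast wl.length 2,
      PySem.List.slice_from wl (by positivity)]
    simp only [Int.toNat_natCast, List.length_drop]
    omega

def count_alt (wordlist : List String) : (List (String × Int)) × Int :=
  ((countRec wordlist).1.items, (countRec wordlist).2)

-- ===== PRECONDITION & SPEC =====
def Spec_count (wordlist : List String) (out : (List (String × Int)) × Int) : Prop := out = count_alt wordlist
instance (wordlist : List String) (out : (List (String × Int)) × Int) : Decidable (Spec_count wordlist out) := by unfold Spec_count; infer_instance

-- ===== CLAIM (what is proved, stated in full; the proofs are below) =====
def Claim_equal_count : Prop := ∀ (wordlist : List String), Dom_count wordlist → Spec_count wordlist (count wordlist)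

-- ===== LEMMAS AND PROOFS =====

-- A's running-max value
def mfold (wl : List String) : Int :=
  wl.foldl (fun m s => if PySem.Str.len s > m then PySem.Str.len s else m) 0

lemma ite_gt_eq_max (m l : Int) : (if l > m then l else m) = max m l := by
  split_ifs with h
  · exact (max_eq_right h.le).symm
  · exact (max_eq_left (not_lt.mp h)).symm

lemma foldl_max_hoist (l : List Int) : ∀ a b : Int,
    l.foldl max (max a b) = max a (l.foldl max b) := by
  induction l with
  | nil => intro a b; rfl
  | cons x t ih =>
    intro a b
    simp only [List.foldl_cons, max_assoc, ih]

lemma mfold_as_max (wl : List String) : ∀ a : Int,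
    wl.foldl (fun m s => if PySem.Str.len s > m then PySem.Str.len s else m) a
      = (wl.map PySem.Str.len).foldl max a := by
  induction wl with
  | nil => intro a; rfl
  | cons x t ih =>
    intro a
    simp only [List.foldl_cons, List.map_cons]
    rw [ih, ite_gt_eq_max]

lemma mfold_append (l r : List String) :
    mfold (l ++ r) = if mfold l > mfold r then mfold l else mfold r := by
  rw [ite_gt_eq_max, max_comm]
  unfold mfold
  rw [mfold_as_max, mfold_as_max, mfold_as_max, List.map_append, List.foldl_append]
  have h0 : (0:Int) ≤ (l.map PySem.Str.len).foldl max 0 :=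
    (PySem.List.le_foldl_max (l.map PySem.Str.len) (0 : Int)).1
  calc ((r.map PySem.Str.len)).foldl max ((l.map PySem.Str.len).foldl max 0)
      = ((r.map PySem.Str.len)).foldl max (max ((l.map PySem.Str.len).foldl max 0) 0) := by
        rw [max_eq_left h0]
    _ = _ := foldl_max_hoist _ _ _

lemma filter_eq_of_nodup (l : List String) (hl : l.Nodup) (k : String) :
    l.filter (fun x => decide (x = k)) = if k ∈ l then [k] else [] := by
  induction l with
  | nil => simp
  | cons x t ih =>
    rcases List.nodup_cons.mp hl with ⟨hx, ht⟩
    by_cases hxk : x = k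
    · subst hxk
      simp [ih ht, hx]
    · simp [hxk, ih ht, Ne.symm hxk]

-- the merge loop's lookups: old value plus the sum of merged values at that key
lemma getD_merge (ps : List (String × Int)) : ∀ (d : PySem.Dict String Int) (k : String),
    (ps.foldl (fun d p => d.insert p.1 (d.getD p.1 0 + p.2)) d).getD k 0
      = d.getD k 0 + ((ps.filter (fun p => decide (p.1 = k))).map (·.2)).sum := by
  induction ps with
  | nil => intro d k; simp
  | cons p t ih =>
    intro d k
    simp only [List.foldl_cons, ih, List.filter_cons]
    by_cases hk : p.1 = k
    · simp [hk, List.sum_cons]; ring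
    · simp [hk, PySem.Dict.getD_insert, Ne.symm hk]

-- merging Counter(r) into Counter(l) is Counter(l ++ r)
lemma merge_counter (l r : List String) :
    (PySem.Dict.counter r).items.foldl (fun d p => d.insert p.1 (d.getD p.1 0 + p.2))
        (PySem.Dict.counter l) = PySem.Dict.counter (l ++ r) := by
  have hnodL : (PySem.Dict.counter l).keys.Nodup := PySem.Dict.nodup_keys_counter l
  have hkeys : ((PySem.Dict.counter r).items.foldl
      (fun d p => d.insert p.1 (d.getD p.1 0 + p.2)) (PySem.Dict.counter l)).keys
      = (PySem.Dict.counter (l ++ r)).keys := by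
    have hmap : (PySem.Dict.counter r).items.map Prod.fst = PySem.Set.ofList r := by
      rw [PySem.Dict.items_counter, List.map_map]
      simp [Function.comp_def]
    rw [PySem.Dict.keys_foldl_insert_key _ Prod.fst _ _, PySem.Dict.keys_counter,
      PySem.Dict.keys_counter, hmap, PySem.Set.ofList_append,
      PySem.Set.update_eq_append_filter, PySem.Set.update_eq_append_filter,
      PySem.Set.ofList_ofList]
  have hnod : ((PySem.Dict.counter r).items.foldl
      (fun d p => d.insert p.1 (d.getD p.1 0 + p.2)) (PySem.Dict.counter l)).keys.Nodup :=
    PySem.Dict.nodup_keys_foldl_insert_key _ Prod.fst _ _ hnodL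
  have hgetD : ∀ k, ((PySem.Dict.counter r).items.foldl
      (fun d p => d.insert p.1 (d.getD p.1 0 + p.2)) (PySem.Dict.counter l)).getD k 0
      = (PySem.Dict.counter (l ++ r)).getD k 0 := by
    intro k
    rw [getD_merge, PySem.Dict.getD_counter, PySem.Dict.getD_counter, List.count_append,
      PySem.Dict.items_counter, List.filter_map, Function.comp_def]
    simp only
    rw [filter_eq_of_nodup _ (PySem.Set.nodup_ofList r) k]
    by_cases hk : k ∈ r
    · simp [PySem.Set.mem_ofList, hk]
    · simp [PySem.Set.mem_ofList, hk, List.count_eq_zero.mpr hk]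
  apply PySem.Dict.ext
  rw [PySem.Dict.items_eq_map_keys _ hnod (0 : Int),
    PySem.Dict.items_eq_map_keys _ (PySem.Dict.nodup_keys_counter (l ++ r)) (0 : Int), hkeys]
  exact List.map_congr_left (fun k _ => by rw [hgetD k])

-- B's core computes Counter(wl) and A's running max
lemma countRec_eq (wl : List String) :
    countRec wl = (PySem.Dict.counter wl, mfold wl) := by
  suffices H : ∀ n (wl : List String), wl.length = n →
      countRec wl = (PySem.Dict.counter wl, mfold wl) from H wl.length wl rfl
  intro n
  induction n using Nat.strong_induction_on with
  | _ n ih =>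
    intro wl hn
    rw [countRec]
    by_cases h0 : wl.length = 0
    · rw [if_pos h0, List.length_eq_zero_iff.mp h0]
      rfl
    · rw [if_neg h0]
      by_cases h1 : wl.length = 1
      · rw [if_pos h1]
        rcases List.length_eq_one_iff.mp h1 with ⟨a, rfl⟩
        have hc : PySem.Dict.counter [a] = PySem.Dict.empty.insert a 1 := by
          rw [← PySem.Dict.foldl_insert_getD_add_one_eq_counter]
          simp [PySem.Dict.getD_empty]
        have hm : mfold [a] = PySem.Str.len a := by
          have : (0:Int) ≤ PySem.Str.len a := by simp [PySem.Str.len_eq]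
          simp only [mfold, List.foldl_cons, List.foldl_nil]
          split_ifs with h <;> omega
        simp only [PySem.List.pyGetD_zero_cons, hc, hm]
      · rw [if_neg h1]
        have hhalf : PySem.Int.floordiv ((wl.length : Int)) 2 = ((wl.length / 2 : Nat) : Int) := by
          exact_mod_cast PySem.Int.floordiv_natCast wl.length 2
        have htake : PySem.List.slice wl none (some (PySem.Int.floordiv (wl.length : Int) 2))
            = List.take (wl.length / 2) wl := by
          rw [hhalf, PySem.List.slice_to wl (by positivity), Int.toNat_natCast]
        have hdrop : PySem.List.slice wl (some (PySem.Int.floordiv (wl.length : Int) 2)) none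
            = List.drop (wl.length / 2) wl := by
          rw [hhalf, PySem.List.slice_from wl (by positivity), Int.toNat_natCast]
        have ihl := ih (List.take (wl.length / 2) wl).length
          (by simp only [List.length_take]; omega) _ rfl
        have ihr := ih (List.drop (wl.length / 2) wl).length
          (by simp only [List.length_drop]; omega) _ rfl
        simp only [htake, hdrop, ihl, ihr]
        rw [merge_counter, List.take_append_drop]
        rw [show mfold wl = mfold (List.take (wl.length / 2) wl
            ++ List.drop (wl.length / 2) wl) from by rw [List.take_append_drop],
          mfold_append]

-- A's loop as a pair of independent folds, the dict fold being Counter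
lemma count_eq (wl : List String) :
    count wl = ((PySem.Dict.counter wl).items, mfold wl) := by
  simp only [count]
  have hsplit : List.foldl (fun (st : PySem.Dict String Int × Int) s =>
        (if st.1.contains s = false then st.1.insert s 1 else st.1.modify s 0 (fun v => v + 1),
         if PySem.Str.len s > st.2 then PySem.Str.len s else st.2)) (PySem.Dict.empty, 0) wl
      = (List.foldl (fun (d : PySem.Dict String Int) s =>
            if d.contains s = false then d.insert s 1 else d.modify s 0 (fun v => v + 1))
            PySem.Dict.empty wl,
         List.foldl (fun (m : Int) s =>
            if PySem.Str.len s > m then PySem.Str.len s else m) 0 wl) :=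
    PySem.List.foldl_prod_mk
      (fun (d : PySem.Dict String Int) s =>
        if d.contains s = false then d.insert s 1 else d.modify s 0 (fun v => v + 1))
      (fun (m : Int) s => if PySem.Str.len s > m then PySem.Str.len s else m)
      wl PySem.Dict.empty 0
  rw [hsplit]
  have hstep : (fun (d : PySem.Dict String Int) s =>
      if d.contains s = false then d.insert s 1 else d.modify s 0 (fun v => v + 1))
      = (fun d s => d.insert s (d.getD s 0 + 1)) := by
    funext d s
    by_cases h : d.contains s = true
    · simp [h, PySem.Dict.modify]
    · have hf : d.contains s = false := by simpa using h
      have hget : d.get? s = none := (PySem.Dict.get?_eq_none_iff_contains d s).mpr hf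
      simp [hf, PySem.Dict.getD, hget]
  rw [hstep, PySem.Dict.foldl_insert_getD_add_one_eq_counter]
  rfl

-- ===== VERDICT (by name: the statement is the Claim_ definition above) =====
theorem count_spec : Claim_equal_count := by
  intro wl _
  show count wl = count_alt wl
  rw [count_eq, count_alt, countRec_eq]
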